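-- pv_equiv track=rewrite | github.com/leeinae/algorithm-python | Programmers/80614.py | solution
-- ===== SOURCE A (Python) =====
-- import heapq
-- from collections import deque
--
-- def solution(healths, items):
--     answer = []
--
--     item_dict = dict()  # 공격력
--     for i in range(len(items)):
--         item_dict[items[i][0]] = i + 1
--
--     items.sort(key=lambda x: x[1])  # 공격력, 체력
--     items = deque(items)
--     healths.sort()
--
--     result = []
--     for health in healths:
--         while items and health - items[0][1] >= 100:
--             item = items.popleft()
--             heapq.heappush(result, (-item[0], item_dict[item[0]]))  # 공격력, 아이템
--         if result:
--             answer.append(heapq.heappop(result)[1])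
--
--     answer.sort()
--     return answer
-- ===== SOURCE B (Python) =====
-- def solution(healths, items):
--     # attack -> 1-based item index (last occurrence wins, as dict assignment overwrites)
--     item_dict = {item[0]: i + 1 for i, item in enumerate(items)}
--
--     items.sort(key=lambda x: x[1])
--     healths.sort()
--
--     answer = []
--     pool = []  # affordable, unassigned items as (attack, index) pairs
--     ptr = 0
--     for health in healths:
--         while ptr < len(items) and health - items[ptr][1] >= 100:
--             attack = items[ptr][0]
--             pool.append((attack, item_dict[attack]))
--             ptr += 1
--         if pool:
--             best = pool[0]
--             for p in pool[1:]:
--                 if p[0] > best[0] or (p[0] == best[0] and p[1] < best[1]):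
--                     best = p
--             pool.remove(best)
--             answer.append(best[1])
--     answer.sort()
--     return answer
-- ===== Notes on version B (the rewrite author's own statement) =====
-- stated objective: simpler
-- what changed: Replaces the heapq priority queue (and the deque) with a plain candidate list advanced by an index pointer: each character scans the candidates linearly for the maximum attack (ties broken by smallest stored index) and removes it, instead of maintaining a binary heap of (-attack, index) pairs.
import Mathlib
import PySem

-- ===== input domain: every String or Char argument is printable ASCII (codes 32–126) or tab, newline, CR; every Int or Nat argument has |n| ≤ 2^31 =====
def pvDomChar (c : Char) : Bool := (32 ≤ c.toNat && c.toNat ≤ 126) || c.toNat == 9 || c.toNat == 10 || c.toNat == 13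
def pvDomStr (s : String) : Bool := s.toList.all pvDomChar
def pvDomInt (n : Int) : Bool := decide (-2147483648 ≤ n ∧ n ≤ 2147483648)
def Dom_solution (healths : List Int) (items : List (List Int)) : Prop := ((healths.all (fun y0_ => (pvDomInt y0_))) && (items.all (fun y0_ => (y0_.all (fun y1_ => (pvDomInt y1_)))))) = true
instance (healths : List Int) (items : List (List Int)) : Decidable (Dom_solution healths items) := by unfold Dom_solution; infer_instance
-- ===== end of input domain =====

-- B replaces A's heapq priority queue and deque by an index pointer plus a plain candidate
-- list scanned linearly for the best item; same return value. Both A and B sort the two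
-- argument lists in place (the caller observes the same mutation); the theorems are about
-- the RETURN value.

-- ===== PORT A =====
-- heapq is ported semantically: heappush appends to the list, heappop removes and returns
-- the lexicographically smallest (Int × Int) pair — exact on heapq's observable behaviour
-- (the internal array layout of the binary heap is not observable in A's result).
def pvLexLt (x y : Int × Int) : Bool := x.1 < y.1 || (x.1 == y.1 && x.2 < y.2)

def pvHeapPop : List (Int × Int) → Option ((Int × Int) × List (Int × Int))
  | [] => none
  | h :: t =>
    let m := t.foldl (fun m x => if pvLexLt x m then x else m) h
    some (m, (h :: t).erase m)

-- item_dict[items[i][0]] = i + 1  for i in range(len(items))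
def pvDictA (items : List (List Int)) : PySem.Dict Int Int :=
  (PySem.List.pyRange 0 items.length 1).foldl
    (fun d i => d.insert (PySem.List.pyGetD (PySem.List.pyGetD items i []) 0 0) (i + 1))
    PySem.Dict.empty

-- while items and health - items[0][1] >= 100: pop left, heappush (-attack, dict index)
def pvDrainA (dict : PySem.Dict Int Int) (health : Int) :
    List (List Int) → List (Int × Int) → List (List Int) × List (Int × Int)
  | [], heap => ([], heap)
  | it :: rest, heap =>
    if 100 ≤ health - PySem.List.pyGetD it 1 0 then
      let a := PySem.List.pyGetD it 0 0
      pvDrainA dict health rest (heap ++ [(-a, dict.getD a 0)])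
    else (it :: rest, heap)

def pvLoopA (dict : PySem.Dict Int Int) :
    List Int → List (List Int) → List (Int × Int) → List Int → List Int
  | [], _, _, ans => ans
  | h :: hs, deq, heap, ans =>
    let s := pvDrainA dict h deq heap
    match pvHeapPop s.2 with
    | none => pvLoopA dict hs s.1 s.2 ans
    | some (m, heap') => pvLoopA dict hs s.1 heap' (ans ++ [m.2])

def solution (healths : List Int) (items : List (List Int)) : List Int :=
  PySem.List.sorted
    (pvLoopA (pvDictA items)
      (PySem.List.sorted healths (fun x => x) false)
      (PySem.List.sorted items (fun x => PySem.List.pyGetD x 1 0) false) [] [])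
    (fun x => x) false

-- ===== PORT B =====
-- item_dict built from enumerate(items); candidate list + pointer; linear best-scan.
def pvDictB (items : List (List Int)) : PySem.Dict Int Int :=
  (PySem.List.enumerate items 0).foldl
    (fun d p => d.insert (PySem.List.pyGetD p.2 0 0) (p.1 + 1))
    PySem.Dict.empty

def pvBetter (p b : Int × Int) : Bool := b.1 < p.1 || (p.1 == b.1 && p.2 < b.2)

-- while ptr < len(items) and health - items[ptr][1] >= 100: append (attack, index), ptr += 1
def pvDrainB (dict : PySem.Dict Int Int) (health : Int) (items : List (List Int))
    (ptr : Nat) (pool : List (Int × Int)) : Nat × List (Int × Int) :=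
  if hp : ptr < items.length then
    let it := items[ptr]
    if 100 ≤ health - PySem.List.pyGetD it 1 0 then
      let a := PySem.List.pyGetD it 0 0
      pvDrainB dict health items (ptr + 1) (pool ++ [(a, dict.getD a 0)])
    else (ptr, pool)
  else (ptr, pool)
  termination_by items.length - ptr

def pvLoopB (dict : PySem.Dict Int Int) (items : List (List Int)) :
    List Int → Nat → List (Int × Int) → List Int → List Int
  | [], _, _, ans => ans
  | h :: hs, ptr, pool, ans =>
    let s := pvDrainB dict h items ptr pool
    match s.2 with
    | [] => pvLoopB dict items hs s.1 s.2 ans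
    | p0 :: ps =>
      let best := ps.foldl (fun b p => if pvBetter p b then p else b) p0
      pvLoopB dict items hs s.1 ((PySem.List.remove? (p0 :: ps) best).getD [])
        (ans ++ [best.2])

def solution_alt (healths : List Int) (items : List (List Int)) : List Int :=
  PySem.List.sorted
    (pvLoopB (pvDictB items)
      (PySem.List.sorted items (fun x => PySem.List.pyGetD x 1 0) false)
      (PySem.List.sorted healths (fun x => x) false) 0 [] [])
    (fun x => x) false

-- ===== PRECONDITION & SPEC =====
-- A raises (IndexError on items[i][0], or in the sort key x[1]) exactly when some item list
-- has fewer than 2 entries; Pre_ excludes only those raising inputs.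
def Pre_solution (_healths : List Int) (items : List (List Int)) : Prop :=
  ∀ it ∈ items, 2 ≤ it.length
instance (healths : List Int) (items : List (List Int)) : Decidable (Pre_solution healths items) := by unfold Pre_solution; infer_instance

def pvWitness_solution : List Int × List (List Int) := ([250, 150], [[5, 50], [7, 60], [5, 40]])

def Spec_solution (healths : List Int) (items : List (List Int)) (out : List Int) : Prop := out = solution_alt healths items
instance (healths : List Int) (items : List (List Int)) (out : List Int) : Decidable (Spec_solution healths items out) := by unfold Spec_solution; infer_instance

-- ===== CLAIM (what is proved, stated in full; the proofs are below) =====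
def Claim_equal_solution : Prop := ∀ (healths : List Int) (items : List (List Int)), Dom_solution healths items → Pre_solution healths items → Spec_solution healths items (solution healths items)

-- ===== LEMMAS AND PROOFS =====

-- relation between B's candidate pairs and A's heap entries
def pvF (p : Int × Int) : Int × Int := (-p.1, p.2)

theorem pvF_injective : Function.Injective pvF := by
  intro a b h
  simp only [pvF, Prod.mk.injEq, neg_inj] at h
  exact Prod.ext h.1 h.2

theorem pvLexLt_pvF (x b : Int × Int) : pvLexLt (pvF x) (pvF b) = pvBetter x b := by
  apply Bool.eq_iff_iff.mpr
  simp only [pvLexLt, pvBetter, pvF, Bool.or_eq_true, Bool.and_eq_true, decide_eq_true_eq,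
    beq_iff_eq]
  omega


theorem pvMin_map (t : List (Int × Int)) : ∀ b,
    (t.map pvF).foldl (fun m x => if pvLexLt x m then x else m) (pvF b)
      = pvF (t.foldl (fun b p => if pvBetter p b then p else b) b) := by
  induction t with
  | nil => intro b; rfl
  | cons p t ih =>
    intro b
    simp only [List.map_cons, List.foldl_cons, pvLexLt_pvF]
    by_cases h : pvBetter p b <;> simp [h, ih]

theorem pvBest_mem (t : List (Int × Int)) : ∀ b,
    t.foldl (fun b p => if pvBetter p b then p else b) b ∈ b :: t := by
  induction t with
  | nil => intro b; simp
  | cons p t ih =>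
    intro b
    simp only [List.foldl_cons]
    by_cases h : pvBetter p b
    · simp only [h, if_pos]
      have := ih p
      simp only [List.mem_cons] at this ⊢
      tauto
    · simp only [h, if_neg, Bool.not_eq_true]
      have := ih b
      simp only [List.mem_cons] at this ⊢
      tauto

theorem pvDict_eq (items : List (List Int)) : pvDictB items = pvDictA items := by
  unfold pvDictA pvDictB
  rw [PySem.List.enumerate_eq_map_pyRange items []]
  rw [List.foldl_map]
  simp [PySem.List.len_eq]

theorem pvDrainB_ptr_le (dict : PySem.Dict Int Int) (h : Int) (items : List (List Int)) :
    ∀ ptr pool, ptr ≤ items.length → (pvDrainB dict h items ptr pool).1 ≤ items.length := by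
  intro ptr
  induction hn : items.length - ptr generalizing ptr with
  | zero =>
    intro pool hle
    unfold pvDrainB
    have : ¬ ptr < items.length := by omega
    simpa [this] using hle
  | succ n ih =>
    intro pool hle
    unfold pvDrainB
    by_cases hp : ptr < items.length
    · simp only [hp, dif_pos]
      by_cases hc : 100 ≤ h - PySem.List.pyGetD items[ptr] 1 0
      · simp only [hc, if_pos]
        exact ih (ptr + 1) (by omega) _ (by omega)
      · simp [hc]; omega
    · simp [hp]; omega

theorem pvDrain_rel (dict : PySem.Dict Int Int) (h : Int) (items : List (List Int)) :
    ∀ ptr pool, ptr ≤ items.length →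
      pvDrainA dict h (items.drop ptr) (pool.map pvF)
        = (items.drop (pvDrainB dict h items ptr pool).1,
           ((pvDrainB dict h items ptr pool).2).map pvF) := by
  intro ptr
  induction hn : items.length - ptr generalizing ptr with
  | zero =>
    intro pool hle
    have hEq : ptr = items.length := by omega
    have hlt : ¬ ptr < items.length := by omega
    rw [pvDrainB]
    simp only [hlt, dif_neg, not_false_iff]
    subst hEq
    simp [pvDrainA]
  | succ n ih =>
    intro pool hle
    have hp : ptr < items.length := by omega
    have hdrop : items.drop ptr = items[ptr] :: items.drop (ptr + 1) :=
      (List.getElem_cons_drop hp).symm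
    rw [pvDrainB]
    simp only [hp, dif_pos]
    by_cases hc : 100 ≤ h - PySem.List.pyGetD items[ptr] 1 0
    · simp only [hc, if_pos]
      rw [hdrop]
      unfold pvDrainA
      simp only [hc, if_pos]
      have := ih (ptr + 1) (by omega)
        (pool ++ [(PySem.List.pyGetD items[ptr] 0 0,
          dict.getD (PySem.List.pyGetD items[ptr] 0 0) 0)]) (by omega)
      simpa [pvF] using this
    · simp only [hc, if_neg, not_false_iff]
      rw [hdrop]
      unfold pvDrainA
      simp only [hc, if_neg, not_false_iff]

theorem pvLoop_rel (dict : PySem.Dict Int Int) (items : List (List Int)) :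
    ∀ hs ptr pool ans, ptr ≤ items.length →
      pvLoopA dict hs (items.drop ptr) (pool.map pvF) ans
        = pvLoopB dict items hs ptr pool ans := by
  intro hs
  induction hs with
  | nil => intro ptr pool ans _; rfl
  | cons h hs ih =>
    intro ptr pool ans hle
    rw [pvLoopA, pvLoopB]
    rw [pvDrain_rel dict h items ptr pool hle]
    have hle' : (pvDrainB dict h items ptr pool).1 ≤ items.length :=
      pvDrainB_ptr_le dict h items ptr pool hle
    rcases hpool : (pvDrainB dict h items ptr pool).2 with _ | ⟨p0, ps⟩
    · simp only [List.map_nil]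
      rw [pvHeapPop]
      exact ih _ [] ans hle'
    · simp only [List.map_cons]
      rw [pvHeapPop]
      simp only
      rw [pvMin_map ps p0]
      set best := ps.foldl (fun b p => if pvBetter p b then p else b) p0 with hbest
      have hmem : best ∈ p0 :: ps := pvBest_mem ps p0
      have herase : ((pvF p0 :: ps.map pvF).erase (pvF best)) = ((p0 :: ps).erase best).map pvF := by
        have := List.map_erase pvF_injective (a := best) (p0 :: ps)
        simpa using this.symm
      rw [herase]
      have hrem : (PySem.List.remove? (p0 :: ps) best).getD [] = (p0 :: ps).erase best := by
        rw [PySem.List.remove?_eq_some_erase (p0 :: ps) best hmem]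
        rfl
      rw [← hrem]
      exact ih _ _ _ hle'

-- ===== VERDICT (by name: the statement is the Claim_ definition above) =====
theorem solution_spec : Claim_equal_solution := by
  intro healths items _ _
  unfold Spec_solution solution solution_alt
  rw [pvDict_eq]
  have h2 := pvLoop_rel (pvDictA items)
    (PySem.List.sorted items (fun x => PySem.List.pyGetD x 1 0) false)
    (PySem.List.sorted healths (fun x => x) false) 0 [] [] (by omega)
  simp only [List.drop_zero, List.map_nil] at h2
  rw [h2]
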